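-- pv_equiv track=rewrite | github.com/mils8545/aoc2019py-team | 04/main.py | part2Validate
-- ===== SOURCE A (Python) =====
-- def part2Validate(num):
--     numString = str(num)
--     ascending = True
--     for i in range(len(numString)-1):
--         if numString[i] > numString[i+1]:
--             ascending = False
--
--     adjacent = False
--     for i in range(1,len(numString)-2):
--         if numString[i] == numString[i+1] and numString[i] != numString[i+2] and numString[i] != numString[i-1]:
--             adjacent = True
--
--     if len(numString) > 2:
--         if numString[0] == numString[1] and numString[0] != numString[2]:
--             adjacent = True
--         if numString[-1] == numString[-2] and numString[-1] != numString[-3]: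
--             adjacent = True
--
--     return ascending and adjacent
-- ===== SOURCE B (Python) =====
-- def part2Validate(num):
--     s = str(num)
--     ascending = all(a <= b for a, b in zip(s, s[1:]))
--     adjacent = False
--     run = 1
--     for a, b in zip(s, s[1:]):
--         if a == b:
--             run += 1
--         else:
--             if run == 2:
--                 adjacent = True
--             run = 1
--     return ascending and (adjacent or run == 2)
-- ===== Notes on version B (the rewrite author's own statement) =====
-- stated objective: simpler
-- what changed: Replaces A's three separate positional-window scans (middle loop plus two boundary guards with negative indexing) by one run-length pass: ascending via all() over adjacent zip pairs, and an isolated pair iff some run of equal digits has length exactly 2.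
-- intended difference: On the two-digit repdigits 11,22,...,99 A returns False because its pair checks only run when len(str(num))>2, while B returns True, the intended value since such numbers are ascending and consist of exactly one isolated double. — e.g. on part2Validate(11): A returns false, B returns true
import Mathlib
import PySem

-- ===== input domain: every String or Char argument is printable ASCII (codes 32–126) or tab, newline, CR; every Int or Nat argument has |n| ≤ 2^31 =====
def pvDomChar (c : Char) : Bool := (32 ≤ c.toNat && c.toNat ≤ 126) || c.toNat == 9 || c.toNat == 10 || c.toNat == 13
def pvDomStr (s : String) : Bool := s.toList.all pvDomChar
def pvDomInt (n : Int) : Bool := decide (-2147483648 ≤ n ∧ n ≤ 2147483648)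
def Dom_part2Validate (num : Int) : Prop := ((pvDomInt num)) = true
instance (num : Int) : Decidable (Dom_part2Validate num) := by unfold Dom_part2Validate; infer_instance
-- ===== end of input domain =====

-- B replaces A's positional-window scans by a single run-length pass (objective: simpler); on 11..99·11 A's len>2 guard makes it return False while B returns True (see D_ below).

-- ===== PORT A =====
-- ascending flag loop: for i in range(len(numString)-1): if numString[i] > numString[i+1]: ascending = False
def pvAscA (s : List Char) : Bool :=
  (PySem.List.pyRange 0 (PySem.List.len s - 1) 1).foldl
    (fun ascending i =>
      if PySem.List.pyGetD s i ' ' > PySem.List.pyGetD s (i+1) ' ' then false else ascending)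
    true

-- adjacent flag: middle loop over range(1, len-2), then the two len>2 boundary guards (s[0..2] and s[-1..-3])
def pvAdjA (s : List Char) : Bool :=
  let adjacent :=
    (PySem.List.pyRange 1 (PySem.List.len s - 2) 1).foldl
      (fun adjacent i =>
        if PySem.List.pyGetD s i ' ' = PySem.List.pyGetD s (i+1) ' ' ∧
           PySem.List.pyGetD s i ' ' ≠ PySem.List.pyGetD s (i+2) ' ' ∧
           PySem.List.pyGetD s i ' ' ≠ PySem.List.pyGetD s (i-1) ' '
        then true else adjacent)
      false
  if 2 < PySem.List.len s then
    let adjacent :=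
      if PySem.List.pyGetD s 0 ' ' = PySem.List.pyGetD s 1 ' ' ∧
         PySem.List.pyGetD s 0 ' ' ≠ PySem.List.pyGetD s 2 ' '
      then true else adjacent
    if PySem.List.pyGetD s (-1) ' ' = PySem.List.pyGetD s (-2) ' ' ∧
       PySem.List.pyGetD s (-1) ' ' ≠ PySem.List.pyGetD s (-3) ' '
    then true else adjacent
  else adjacent

def part2Validate (num : Int) : Bool :=
  let numString := (PySem.Int.toStr num).toList
  pvAscA numString && pvAdjA numString

-- ===== PORT B =====
-- one step of Source B's run-length loop (state = (adjacent, run))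
def pvRunStep (st : Bool × Int) (q : Char × Char) : Bool × Int :=
  if q.1 = q.2 then (st.1, st.2 + 1)
  else ((if st.2 = 2 then true else st.1), 1)

def part2Validate_alt (num : Int) : Bool :=
  let s := (PySem.Int.toStr num).toList
  let ascending := (s.zip (PySem.List.slice s (some 1) none)).all (fun q => decide (q.1 ≤ q.2))
  let st := (s.zip (PySem.List.slice s (some 1) none)).foldl pvRunStep (false, 1)
  ascending && (st.1 || st.2 == 2)

-- ===== PRECONDITION & SPEC =====
-- On the two-digit repdigits 11,22,...,99 A returns False (its pair checks only run when len(str(num))>2) while B returns True, the intended value: such numbers are ascending with exactly one isolated double.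
def D_part2Validate (num : Int) : Prop := 10 ≤ num ∧ num ≤ 99 ∧ num % 11 = 0
instance (num : Int) : Decidable (D_part2Validate num) := by unfold D_part2Validate; infer_instance

def Spec_part2Validate (num : Int) (out : Bool) : Prop := ¬ D_part2Validate num → out = part2Validate_alt num
instance (num : Int) (out : Bool) : Decidable (Spec_part2Validate num out) := by unfold Spec_part2Validate; infer_instance

def pvDiffWitness_part2Validate : Int := 11
def pvDiffWitnessOut_part2Validate : Bool × Bool := (false, true)

-- ===== CLAIM (what is proved, stated in full; the proofs are below) =====
def Claim_unchanged_part2Validate : Prop := ∀ (num : Int), Dom_part2Validate num → Spec_part2Validate num (part2Validate num)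
def Claim_changed_part2Validate : Prop := Dom_part2Validate (pvDiffWitness_part2Validate) ∧ D_part2Validate (pvDiffWitness_part2Validate) ∧ part2Validate (pvDiffWitness_part2Validate) = pvDiffWitnessOut_part2Validate.1 ∧ part2Validate_alt (pvDiffWitness_part2Validate) = pvDiffWitnessOut_part2Validate.2 ∧ pvDiffWitnessOut_part2Validate.1 ≠ pvDiffWitnessOut_part2Validate.2
def Claim_exact_part2Validate : Prop := ∀ (num : Int), Dom_part2Validate num → D_part2Validate num → part2Validate num ≠ part2Validate_alt num

-- ===== LEMMAS AND PROOFS =====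

-- the common "non-descending adjacent pairs" property both ascending computations decide
def pvAscP (t : List Char) : Prop := ∀ k : Nat, k + 1 < t.length → t.getD k ' ' ≤ t.getD (k+1) ' '
-- "t has an isolated pair": a position k with equal neighbours, different (or absent) char before and after
def pvAdjP (t : List Char) : Prop :=
  ∃ k : Nat, k + 1 < t.length ∧ t.getD k ' ' = t.getD (k+1) ' ' ∧
    (k = 0 ∨ t.getD (k-1) ' ' ≠ t.getD k ' ') ∧
    (k + 2 = t.length ∨ t.getD (k+2) ' ' ≠ t.getD k ' ')


-- foldl of A's ascending flag loop, specialised to A's body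
theorem pv_foldl_asc (t : List Char) (l : List Int) (init : Bool) :
    l.foldl (fun ascending i =>
      if PySem.List.pyGetD t i ' ' > PySem.List.pyGetD t (i+1) ' ' then false else ascending) init
    = (init && l.all fun i => decide ¬(PySem.List.pyGetD t i ' ' > PySem.List.pyGetD t (i+1) ' ')) := by
  induction l generalizing init with
  | nil => simp
  | cons hd tl ih =>
    simp only [List.foldl_cons, List.all_cons, ih]
    by_cases h : PySem.List.pyGetD t hd ' ' > PySem.List.pyGetD t (hd+1) ' ' <;> simp [h]

theorem pvAscA_iff (t : List Char) : pvAscA t = true ↔ pvAscP t := by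
  unfold pvAscA
  rw [pv_foldl_asc]
  simp only [Bool.true_and, List.all_eq_true, PySem.List.mem_pyRange_one, PySem.List.len_eq,
    decide_eq_true_iff, not_lt, gt_iff_lt]
  constructor
  · intro h k hk
    have hb : (0:Int) ≤ (k:Int) ∧ (k:Int) < (t.length:Int) - 1 := by constructor <;> omega
    have := h (k:Int) hb
    rwa [show ((k:Int)+1) = ((k+1:Nat):Int) by push_cast; ring, PySem.List.pyGetD_natCast,
      PySem.List.pyGetD_natCast] at this
  · intro h i hi
    obtain ⟨h0, h1⟩ := hi
    obtain ⟨k, rfl⟩ : ∃ k : Nat, i = (k:Int) := ⟨i.toNat, by omega⟩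
    rw [show ((k:Int)+1) = ((k+1:Nat):Int) by push_cast; ring, PySem.List.pyGetD_natCast,
      PySem.List.pyGetD_natCast]
    exact h k (by omega)

-- foldl of A's middle adjacent flag loop, specialised to its body
theorem pv_foldl_adj (t : List Char) (l : List Int) (init : Bool) :
    l.foldl (fun adjacent i =>
      if PySem.List.pyGetD t i ' ' = PySem.List.pyGetD t (i+1) ' ' ∧
         PySem.List.pyGetD t i ' ' ≠ PySem.List.pyGetD t (i+2) ' ' ∧
         PySem.List.pyGetD t i ' ' ≠ PySem.List.pyGetD t (i-1) ' '
      then true else adjacent) init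
    = (init || l.any fun i => decide (PySem.List.pyGetD t i ' ' = PySem.List.pyGetD t (i+1) ' ' ∧
         PySem.List.pyGetD t i ' ' ≠ PySem.List.pyGetD t (i+2) ' ' ∧
         PySem.List.pyGetD t i ' ' ≠ PySem.List.pyGetD t (i-1) ' ')) := by
  induction l generalizing init with
  | nil => simp
  | cons hd tl ih =>
    simp only [List.foldl_cons, List.any_cons, ih]
    by_cases h : PySem.List.pyGetD t hd ' ' = PySem.List.pyGetD t (hd+1) ' ' ∧
         PySem.List.pyGetD t hd ' ' ≠ PySem.List.pyGetD t (hd+2) ' ' ∧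
         PySem.List.pyGetD t hd ' ' ≠ PySem.List.pyGetD t (hd-1) ' ' <;>
      simp [h, Bool.or_assoc, Bool.or_comm]

theorem pv_cond_cast (t : List Char) (k : Nat) (hk : 1 ≤ k) :
    (PySem.List.pyGetD t (k:Int) ' ' = PySem.List.pyGetD t ((k:Int)+1) ' ' ∧
     PySem.List.pyGetD t (k:Int) ' ' ≠ PySem.List.pyGetD t ((k:Int)+2) ' ' ∧
     PySem.List.pyGetD t (k:Int) ' ' ≠ PySem.List.pyGetD t ((k:Int)-1) ' ')
    ↔ (t.getD k ' ' = t.getD (k+1) ' ' ∧ t.getD k ' ' ≠ t.getD (k+2) ' ' ∧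
       t.getD k ' ' ≠ t.getD (k-1) ' ') := by
  rw [show ((k:Int)+1) = ((k+1:Nat):Int) by push_cast; ring,
      show ((k:Int)+2) = ((k+2:Nat):Int) by push_cast; ring,
      show ((k:Int)-1) = ((k-1:Nat):Int) by omega,
      PySem.List.pyGetD_natCast, PySem.List.pyGetD_natCast, PySem.List.pyGetD_natCast,
      PySem.List.pyGetD_natCast]

theorem pvAdjA_iff (t : List Char) : pvAdjA t = true ↔ (3 ≤ t.length ∧ pvAdjP t) := by
  unfold pvAdjA
  rw [pv_foldl_adj]
  simp only [Bool.false_or, PySem.List.len_eq]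
  by_cases hn : (2:Int) < (t.length:Int)
  case neg =>
    rw [if_neg hn]
    have : PySem.List.pyRange 1 ((t.length:Int) - 2) 1 = [] :=
      PySem.List.pyRange_one_eq_nil (by omega)
    simp [this]
    omega
  case pos =>
    rw [if_pos hn]
    have h3 : 3 ≤ t.length := by omega
    have g1 : PySem.List.pyGetD t (-1) ' ' = t.getD (t.length - 1) ' ' := by
      rw [PySem.List.pyGetD_neg_ofNat t 1 ' ' (by omega) (by omega), List.getD_eq_getElem]
    have g2 : PySem.List.pyGetD t (-2) ' ' = t.getD (t.length - 2) ' ' := by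
      rw [PySem.List.pyGetD_neg_ofNat t 2 ' ' (by omega) (by omega), List.getD_eq_getElem]
    have g3 : PySem.List.pyGetD t (-3) ' ' = t.getD (t.length - 3) ' ' := by
      rw [PySem.List.pyGetD_neg_ofNat t 3 ' ' (by omega) (by omega), List.getD_eq_getElem]
    have p0 : PySem.List.pyGetD t 0 ' ' = t.getD 0 ' ' := by
      rw [show (0:Int) = ((0:Nat):Int) by norm_num, PySem.List.pyGetD_natCast]
    have p1 : PySem.List.pyGetD t 1 ' ' = t.getD 1 ' ' := by
      rw [show (1:Int) = ((1:Nat):Int) by norm_num, PySem.List.pyGetD_natCast]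
    have p2 : PySem.List.pyGetD t 2 ' ' = t.getD 2 ' ' := by
      rw [show (2:Int) = ((2:Nat):Int) by norm_num, PySem.List.pyGetD_natCast]
    rw [g1, g2, g3, p0, p1, p2]
    constructor
    · intro hres
      refine ⟨h3, ?_⟩
      by_cases hG2 : t.getD (t.length-1) ' ' = t.getD (t.length-2) ' ' ∧
          t.getD (t.length-1) ' ' ≠ t.getD (t.length-3) ' '
      · -- last-pair guard fired: k = length - 2
        refine ⟨t.length - 2, by omega, ?_, ?_, ?_⟩
        · rw [show t.length - 2 + 1 = t.length - 1 by omega]; exact hG2.1.symm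
        · right
          rw [show t.length - 2 - 1 = t.length - 3 by omega]
          intro hcon
          exact hG2.2 (by rw [← hG2.1] at hcon; exact (hcon.symm))
        · left; omega
      · rw [if_neg hG2] at hres
        by_cases hG1 : t.getD 0 ' ' = t.getD 1 ' ' ∧ t.getD 0 ' ' ≠ t.getD 2 ' '
        · exact ⟨0, by omega, hG1.1, Or.inl rfl, Or.inr (fun hcon => hG1.2 hcon.symm)⟩
        · rw [if_neg hG1] at hres
          simp only [List.any_eq_true, PySem.List.mem_pyRange_one, decide_eq_true_iff] at hres
          obtain ⟨i, ⟨hi1, hi2⟩, hcond⟩ := hres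
          obtain ⟨k, rfl⟩ : ∃ k : Nat, i = (k:Int) := ⟨i.toNat, by omega⟩
          rw [pv_cond_cast t k (by omega)] at hcond
          obtain ⟨heq, hne2, hne1⟩ := hcond
          exact ⟨k, by omega, heq, Or.inr (fun hcon => hne1 hcon.symm),
            Or.inr (fun hcon => hne2 hcon.symm)⟩
    · rintro ⟨-, k, hk, heq, hL, hR⟩
      by_cases hk0 : k = 0
      · subst hk0
        have hne2 : t.getD 0 ' ' ≠ t.getD 2 ' ' := by
          rcases hR with h2 | h2
          · omega
          · exact fun hcon => h2 hcon.symm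
        have hG1 : t.getD 0 ' ' = t.getD 1 ' ' ∧ t.getD 0 ' ' ≠ t.getD 2 ' ' := ⟨heq, hne2⟩
        split_ifs <;> simp_all
      · by_cases hk2 : k + 2 = t.length
        · -- k = length - 2
          have hG2 : t.getD (t.length-1) ' ' = t.getD (t.length-2) ' ' ∧
              t.getD (t.length-1) ' ' ≠ t.getD (t.length-3) ' ' := by
            rcases hL with h | hL
            · omega
            constructor
            · rw [show t.length - 1 = k + 1 by omega, show t.length - 2 = k by omega]
              exact heq.symm
            · rw [show t.length - 1 = k + 1 by omega, show t.length - 3 = k - 1 by omega]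
              rw [← heq]
              exact fun hcon => hL hcon.symm
          split_ifs <;> simp_all
        · -- middle loop covers k

          have hmid : ∃ i : Int, (1 ≤ i ∧ i < (t.length:Int) - 2) ∧
              (PySem.List.pyGetD t i ' ' = PySem.List.pyGetD t (i+1) ' ' ∧
               PySem.List.pyGetD t i ' ' ≠ PySem.List.pyGetD t (i+2) ' ' ∧
               PySem.List.pyGetD t i ' ' ≠ PySem.List.pyGetD t (i-1) ' ') := by
            have hk1 : 1 ≤ k := by omega
            refine ⟨(k:Int), ⟨by omega, by omega⟩, ?_⟩
            rw [pv_cond_cast t k hk1]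
            refine ⟨heq, ?_, ?_⟩
            · rcases hR with h | h
              · omega
              · exact fun hcon => h hcon.symm
            · rcases hL with h | h
              · omega
              · exact fun hcon => h hcon.symm
          have hany : (PySem.List.pyRange 1 ((t.length:Int) - 2) 1).any
              (fun i => decide (PySem.List.pyGetD t i ' ' = PySem.List.pyGetD t (i+1) ' ' ∧
               PySem.List.pyGetD t i ' ' ≠ PySem.List.pyGetD t (i+2) ' ' ∧
               PySem.List.pyGetD t i ' ' ≠ PySem.List.pyGetD t (i-1) ' ')) = true := by
            simp only [List.any_eq_true, PySem.List.mem_pyRange_one, decide_eq_true_iff]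
            obtain ⟨i, hi, hc⟩ := hmid
            exact ⟨i, hi, hc⟩
          split_ifs <;> simp_all

-- B's ascending: all() over adjacent zip pairs
theorem pv_zip_all (t : List Char) (p : Char → Char → Bool) :
    ((t.zip t.tail).all fun q => p q.1 q.2) = true ↔
      ∀ k : Nat, k + 1 < t.length → p (t.getD k ' ') (t.getD (k+1) ' ') = true := by
  induction t with
  | nil => simp
  | cons a t ih =>
    cases t with
    | nil => simp
    | cons b u =>
      rw [List.tail_cons, List.zip_cons_cons, List.all_cons, Bool.and_eq_true]
      have ih' := ih
      rw [List.tail_cons] at ih'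
      rw [ih']
      constructor
      · rintro ⟨h0, h⟩ k hk
        cases k with
        | zero => simpa using h0
        | succ k =>
          have := h k (by simp at hk ⊢; omega)
          simpa using this
      · intro h
        refine ⟨by simpa using h 0 (by simp), fun k hk => ?_⟩
        have := h (k+1) (by simp at hk ⊢; omega)
        simpa using this

theorem pvAscB_iff (t : List Char) :
    ((t.zip (PySem.List.slice t (some 1) none)).all (fun q => decide (q.1 ≤ q.2)) = true) ↔ pvAscP t := by
  rw [PySem.List.slice_from_one, pv_zip_all t (fun a b => decide (a ≤ b))]
  unfold pvAscP
  simp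

-- run-length characterisation of B's fold
def pvG : List Char → Char → Nat → Bool
  | [], _, m => m == 2
  | d :: r, prev, m => if prev = d then pvG r d (m+1) else ((m == 2) || pvG r d 1)

theorem pv_run_fold (rest : List Char) (prev : Char) (adj : Bool) (m : Nat) :
    ((((prev :: rest).zip rest).foldl pvRunStep (adj, (m:Int))).1
      || (((prev :: rest).zip rest).foldl pvRunStep (adj, (m:Int))).2 == 2)
      = (adj || pvG rest prev m) := by
  induction rest generalizing prev adj m with
  | nil =>
    simp only [List.zip_nil_right, List.foldl_nil, pvG]
    have : (((m:Nat):Int) == 2) = (m == 2) := by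
      by_cases h : m = 2
      · subst h; rfl
      · have h1 : (((m:Nat):Int) == 2) = false := by
          rw [beq_eq_false_iff_ne]; omega
        have h2 : (m == 2) = false := by
          rw [beq_eq_false_iff_ne]; exact h
        rw [h1, h2]
    simp [this]
  | cons d r ih =>
    rw [List.zip_cons_cons, List.foldl_cons]
    by_cases h : prev = d
    · have hstep : pvRunStep (adj, (m:Int)) (prev, d) = (adj, ((m+1:Nat):Int)) := by
        simp [pvRunStep, h]
      rw [hstep, ih]
      simp [pvG, h]
    · have hstep : pvRunStep (adj, (m:Int)) (prev, d) =
          ((if m = 2 then true else adj), ((1:Nat):Int)) := by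
        simp only [pvRunStep, if_neg h]
        congr 1
        by_cases hm : m = 2 <;> simp [hm] <;> omega
      rw [hstep, ih]
      simp only [pvG, if_neg h]
      by_cases hm : m = 2
      · simp [hm]
      · have hb : (m == 2) = false := by simpa using hm
        simp [hm, hb]

-- getD through replicate-prefix
theorem pv_getD_rep_app (m : Nat) (c : Char) (u : List Char) (j : Nat) :
    (List.replicate m c ++ u).getD j ' ' = if j < m then c else u.getD (j - m) ' ' := by
  by_cases h : j < m
  · rw [if_pos h, List.getD_eq_getElem?_getD, List.getElem?_append_left (by simpa using h),
      List.getElem?_replicate, if_pos h]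
    rfl
  · rw [if_neg h, List.getD_eq_getElem?_getD, List.getElem?_append_right (by simpa using h),
      List.getD_eq_getElem?_getD, List.length_replicate]

theorem pv_adjP_replicate (m : Nat) (c : Char) : pvAdjP (List.replicate m c) ↔ m = 2 := by
  constructor
  · rintro ⟨k, hk, heq, hL, hR⟩
    rw [List.length_replicate] at hk hR
    have gr : ∀ j, j < m → (List.replicate m c).getD j ' ' = c := fun j hj => by
      rw [List.getD_eq_getElem?_getD, List.getElem?_replicate, if_pos hj]; rfl
    rcases hL with rfl | hne
    · rcases hR with h2 | hne
      · omega
      · by_contra hm2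
        exact hne (by rw [gr _ (by omega), gr _ (by omega)])
    · exfalso
      exact hne (by rw [gr _ (by omega), gr _ (by omega)])
  · rintro rfl
    refine ⟨0, by simp, by simp, Or.inl rfl, Or.inl (by simp)⟩

theorem pv_adjP_rep_cons (m : Nat) (hm : 1 ≤ m) (p d : Char) (hpd : p ≠ d) (r : List Char) :
    pvAdjP (List.replicate m p ++ d :: r) ↔ (m = 2 ∨ pvAdjP (d :: r)) := by
  have hlen : (List.replicate m p ++ d :: r).length = m + 1 + r.length := by simp; omega
  constructor
  · rintro ⟨k, hk, heq, hL, hR⟩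
    rw [hlen] at hk hR
    simp only [List.length_cons] at *
    rw [pv_getD_rep_app, pv_getD_rep_app] at heq
    by_cases hkm : k + 1 < m
    · -- pair inside the replicate block
      left
      rw [if_pos (by omega), if_pos (by omega)] at heq
      have hk0 : k = 0 := by
        by_contra h0
        rcases hL with h | h
        · exact h0 h
        · rw [pv_getD_rep_app, pv_getD_rep_app, if_pos (by omega), if_pos (by omega)] at h
          exact h rfl
      subst hk0
      by_cases h2m : 2 < m
      · exfalso
        rcases hR with h | h
        · omega
        · rw [pv_getD_rep_app, pv_getD_rep_app, if_pos (by omega), if_pos (by omega)] at h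
          exact h rfl
      · omega
    · by_cases hkm2 : k < m
      · -- boundary pair (p, d): impossible
        exfalso
        rw [if_pos hkm2, if_neg (by omega), show k + 1 - m = 0 by omega, List.getD_cons_zero] at heq
        exact hpd heq
      · -- pair inside d :: r
        right
        have hkge : m ≤ k := by omega
        rw [if_neg (by omega), if_neg (by omega), show k + 1 - m = (k - m) + 1 by omega] at heq
        refine ⟨k - m, by simp only [List.length_cons]; omega, heq, ?_, ?_⟩
        · by_cases hkm' : k = m
          · left; omega
          · right
            rcases hL with h | h
            · omega
            · rw [pv_getD_rep_app, pv_getD_rep_app, if_neg (by omega), if_neg (by omega),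
                show k - 1 - m = k - m - 1 by omega] at h
              exact h
        · rcases hR with h | h
          · left; simp only [List.length_cons]; omega
          · right
            rw [pv_getD_rep_app, pv_getD_rep_app, if_neg (by omega), if_neg (by omega),
              show k + 2 - m = k - m + 2 by omega] at h
            exact h
  · rintro (rfl | ⟨k, hk, heq, hL, hR⟩)
    · refine ⟨0, by rw [hlen]; omega, ?_, Or.inl rfl, ?_⟩

      · rw [pv_getD_rep_app, pv_getD_rep_app, if_pos (by omega), if_pos (by omega)]
      · right
        rw [pv_getD_rep_app, pv_getD_rep_app, if_neg (by omega), if_pos (by omega),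
          show 0 + 2 - 2 = 0 by omega, List.getD_cons_zero]
        exact fun hcon => hpd hcon.symm
    · simp only [List.length_cons] at hk hR
      refine ⟨k + m, by rw [hlen]; omega, ?_, ?_, ?_⟩
      · rw [pv_getD_rep_app, pv_getD_rep_app, if_neg (by omega), if_neg (by omega),
          show k + m - m = k by omega, show k + m + 1 - m = k + 1 by omega]
        exact heq
      · right
        by_cases hk0 : k = 0
        · subst hk0
          rw [pv_getD_rep_app, pv_getD_rep_app, if_pos (by omega), if_neg (by omega),
            show 0 + m - m = 0 by omega, List.getD_cons_zero]
          exact hpd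
        · rcases hL with h | h
          · omega
          · rw [pv_getD_rep_app, pv_getD_rep_app, if_neg (by omega), if_neg (by omega),
              show k + m - 1 - m = k - 1 by omega, show k + m - m = k by omega]
            exact h
      · rcases hR with h | h
        · left; rw [hlen]; omega
        · right
          rw [pv_getD_rep_app, pv_getD_rep_app, if_neg (by omega), if_neg (by omega),
            show k + m + 2 - m = k + 2 by omega, show k + m - m = k by omega]
          exact h

theorem pvG_spec (rest : List Char) (prev : Char) (m : Nat) (hm : 1 ≤ m) :
    pvG rest prev m = true ↔ pvAdjP (List.replicate m prev ++ rest) := by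
  induction rest generalizing prev m with
  | nil =>
    rw [List.append_nil, pv_adjP_replicate]
    simp [pvG]
  | cons d r ih =>
    by_cases h : prev = d
    · subst h
      rw [show pvG (prev :: r) prev m = pvG r prev (m+1) from by simp [pvG],
        ih prev (m+1) (by omega),
        show List.replicate m prev ++ prev :: r = List.replicate (m+1) prev ++ r from by
          rw [List.replicate_succ']; simp]
    · rw [show pvG (d :: r) prev m = ((m == 2) || pvG r d 1) from by simp [pvG, h],
        pv_adjP_rep_cons m hm prev d h r]
      rw [Bool.or_eq_true, ih d 1 (by omega)]
      simp

theorem pvAdjB_iff (t : List Char) :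
    (((t.zip (PySem.List.slice t (some 1) none)).foldl pvRunStep (false, 1)).1
      || ((t.zip (PySem.List.slice t (some 1) none)).foldl pvRunStep (false, 1)).2 == 2) = true
      ↔ pvAdjP t := by
  rw [PySem.List.slice_from_one]
  cases t with
  | nil =>
    simp only [List.tail_nil, List.zip_nil_right, List.foldl_nil]
    constructor
    · intro h; simp at h
    · rintro ⟨k, hk, _⟩; simp at hk
  | cons prev rest =>
    rw [List.tail_cons, show ((1:Int)) = ((1:Nat):Int) by norm_num, pv_run_fold]
    rw [Bool.false_or, pvG_spec rest prev 1 (by omega)]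
    simp

-- ===== str(num) can only be a two-char repdigit for num ∈ {11,…,99} =====

theorem pv_toDigits_small (m : Nat) (h : m < 10) : Nat.toDigits 10 m = [Nat.digitChar m] := by
  simp [Nat.toDigits, Nat.toDigitsCore, Nat.div_eq_of_lt h, Nat.mod_eq_of_lt h]

theorem pv_toDigits_two (m : Nat) (h10 : 10 ≤ m) (h100 : m < 100) :
    Nat.toDigits 10 m = [Nat.digitChar (m / 10), Nat.digitChar (m % 10)] := by
  obtain ⟨f, rfl⟩ : ∃ f, m = f + 2 := ⟨m - 2, by omega⟩
  have hd : (f+2) / 10 ≠ 0 := by omega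
  have hdd : ((f+2) / 10) / 10 = 0 := by omega
  have hm : (f+2) / 10 % 10 = (f+2) / 10 := by omega
  simp [Nat.toDigits, Nat.toDigitsCore, hd, hdd, hm]

theorem pv_core_len (fuel : Nat) : ∀ (n : Nat) (acc : List Char), 10 ≤ n → n < 10 ^ fuel →
    acc.length + 2 ≤ (Nat.toDigitsCore 10 fuel n acc).length := by
  induction fuel with
  | zero => intro n acc h10 hf; simp at hf; omega
  | succ f ih =>
    intro n acc h10 hf
    have hd : ¬ (n / 10 = 0) := by omega
    rw [show Nat.toDigitsCore 10 (f+1) n acc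
        = Nat.toDigitsCore 10 f (n/10) (Nat.digitChar (n % 10) :: acc) from by
      simp [Nat.toDigitsCore, hd]]
    by_cases h : 10 ≤ n / 10
    · have hlt : n / 10 < 10 ^ f := by
        have h2 : n < 10 ^ f * 10 := by rw [← pow_succ]; exact hf
        omega
      have := ih (n/10) (Nat.digitChar (n%10) :: acc) h hlt
      simp at this ⊢
      omega
    · cases f with
      | zero => simp at hf; omega
      | succ f' =>
        have hdd : (n / 10) / 10 = 0 := by omega
        rw [show Nat.toDigitsCore 10 (f'+1) (n/10) (Nat.digitChar (n % 10) :: acc)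
            = Nat.digitChar (n / 10 % 10) :: Nat.digitChar (n % 10) :: acc from by
          simp [Nat.toDigitsCore, hdd]]
        simp

theorem pv_toDigits_big (m : Nat) (h : 100 ≤ m) : (Nat.toDigits 10 m).length ≠ 2 := by
  have hd : ¬ (m / 10 = 0) := by omega
  have h1 : Nat.toDigits 10 m
      = Nat.toDigitsCore 10 m (m/10) [Nat.digitChar (m % 10)] := by
    simp [Nat.toDigits, Nat.toDigitsCore, hd]
  have hlt : m / 10 < 10 ^ m := by
    have := Nat.lt_pow_self (n := m) (a := 10) (by norm_num)
    omega
  have := pv_core_len m (m/10) [Nat.digitChar (m % 10)] (by omega) hlt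
  rw [h1]
  simp at this ⊢
  omega

theorem pv_mem_core (fuel : Nat) : ∀ (n : Nat) (acc : List Char) (c : Char),
    c ∈ Nat.toDigitsCore 10 fuel n acc → c ∈ acc ∨ ∃ k, k < 10 ∧ c = Nat.digitChar k := by
  induction fuel with
  | zero => intro n acc c hc; left; simpa [Nat.toDigitsCore] using hc
  | succ f ih =>
    intro n acc c hc
    by_cases hd : n / 10 = 0
    · rw [show Nat.toDigitsCore 10 (f+1) n acc = Nat.digitChar (n % 10) :: acc from by
        simp [Nat.toDigitsCore, hd]] at hc
      rcases List.mem_cons.mp hc with rfl | hmem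
      · exact Or.inr ⟨n % 10, by omega, rfl⟩
      · exact Or.inl hmem
    · rw [show Nat.toDigitsCore 10 (f+1) n acc
          = Nat.toDigitsCore 10 f (n/10) (Nat.digitChar (n % 10) :: acc) from by
        simp [Nat.toDigitsCore, hd]] at hc
      rcases ih (n/10) _ c hc with hmem | hdig
      · rcases List.mem_cons.mp hmem with rfl | hmem'
        · exact Or.inr ⟨n % 10, by omega, rfl⟩
        · exact Or.inl hmem'
      · exact Or.inr hdig

theorem pv_digitChar_ne_dash : ∀ k, k < 10 → Nat.digitChar k ≠ '-' := by decide

theorem pv_digitChar_inj : ∀ k, k < 10 → ∀ l, l < 10 →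
    Nat.digitChar k = Nat.digitChar l → k = l := by decide

theorem pv_not_pair (num : Int) (h : ¬ D_part2Validate num) :
    ¬ ∃ c : Char, PySem.Int.toChars num = [c, c] := by
  rintro ⟨c, hc⟩
  unfold PySem.Int.toChars at hc
  split_ifs at hc with hneg
  · -- negative: '-' :: digits = [c, c] would put '-' among the digit chars
    injection hc with h1 h2
    have hdm : '-' ∈ Nat.toDigits 10 num.natAbs := by
      rw [h2, h1]
      exact List.mem_singleton_self _
    unfold Nat.toDigits at hdm
    rcases pv_mem_core _ _ _ _ hdm with hmem | ⟨k, hk, hek⟩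
    · simp at hmem
    · exact pv_digitChar_ne_dash k hk hek.symm
  · have hm : num = ((num.toNat : Nat) : Int) := by omega
    set m := num.toNat with hmdef
    rcases Nat.lt_or_ge m 10 with hsm | hge10
    · rw [pv_toDigits_small m hsm] at hc
      simp at hc
    · rcases Nat.lt_or_ge m 100 with hlt100 | hge100
      · rw [pv_toDigits_two m hge10 hlt100] at hc
        injection hc with he1 hc2
        injection hc2 with he2 _
        have hdm : m / 10 = m % 10 :=
          pv_digitChar_inj _ (by omega) _ (by omega) (he1.trans he2.symm)
        exact h ⟨by omega, by omega, by omega⟩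
      · exact pv_toDigits_big m hge100 (by rw [hc]; rfl)

-- ===== VERDICT (by name: the statement is the Claim_ definition above) =====

theorem part2Validate_spec : Claim_unchanged_part2Validate := by
  intro num _ hD
  show part2Validate num = part2Validate_alt num
  have hnp := pv_not_pair num hD
  simp only [part2Validate, part2Validate_alt, PySem.Int.toList_toStr]
  generalize hT : PySem.Int.toChars num = t at hnp ⊢
  have h1 := pvAscA_iff t
  have h2 := pvAdjA_iff t
  have h3 := pvAscB_iff t
  have h4 := pvAdjB_iff t
  have key : pvAdjP t → 3 ≤ t.length := by
    rintro ⟨k, hk, heq, -, -⟩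
    by_contra hlen
    have hl2 : t.length = 2 := by omega
    obtain ⟨a, b, rfl⟩ := List.length_eq_two.mp hl2
    have hk0 : k = 0 := by omega
    subst hk0
    simp at heq
    exact hnp ⟨a, by rw [heq]⟩
  rw [Bool.eq_iff_iff]
  simp only [Bool.and_eq_true, h1, h2, h3, h4]
  constructor
  · rintro ⟨ha, -, hb⟩; exact ⟨ha, hb⟩
  · rintro ⟨ha, hb⟩; exact ⟨ha, key hb, hb⟩

theorem part2Validate_changed : Claim_changed_part2Validate := by
  unfold Claim_changed_part2Validate; decide

theorem part2Validate_tight : Claim_exact_part2Validate := by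
  intro num _ hD
  obtain ⟨h1, h2, h3⟩ := hD
  have : num = 11 ∨ num = 22 ∨ num = 33 ∨ num = 44 ∨ num = 55 ∨ num = 66 ∨ num = 77 ∨ num = 88 ∨ num = 99 := by omega
  rcases this with rfl | rfl | rfl | rfl | rfl | rfl | rfl | rfl | rfl <;> decide
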